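-- pv_equiv track=rewrite | github.com/Rishavmit14/TradingMamba | backend/app/ml/feature_extractor.py | extract_cooccurrence_features
-- ===== SOURCE A (Python) =====
-- from typing import Dict, List, Optional, Tuple
-- from collections import defaultdict
--
-- SMART_MONEY_VOCABULARY = {
--     # Market Structure
--     'market_structure': ['bos', 'break of structure', 'choch', 'change of character',
--                          'higher high', 'higher low', 'lower high', 'lower low',
--                          'hh', 'hl', 'lh', 'll', 'trend', 'structure'],
--
--     # Order Blocks
--     'order_block': ['order block', 'orderblock', 'ob', 'bullish ob', 'bearish ob',
--                     'mitigation', 'mitigated', 'unmitigated'],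
--
--     # Fair Value Gaps
--     'fair_value_gap': ['fair value gap', 'fvg', 'imbalance', 'inefficiency',
--                        'balanced price range', 'bpr'],
--
--     # Liquidity
--     'liquidity': ['liquidity', 'buy side liquidity', 'sell side liquidity',
--                   'bsl', 'ssl', 'liquidity sweep', 'liquidity grab',
--                   'stop hunt', 'equal highs', 'equal lows', 'eqh', 'eql'],
--
--     # Premium/Discount
--     'premium_discount': ['premium', 'discount', 'equilibrium', 'eq',
--                          'premium array', 'discount array', '50%', 'fifty percent'],
--
--     # Kill Zones
--     'kill_zones': ['kill zone', 'killzone', 'asian session', 'london session',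
--                    'new york session', 'london open', 'ny open', 'asian range'],
--
--     # Entry Models
--     'entry_models': ['optimal trade entry', 'ote', 'silver bullet',
--                      'power of three', 'po3', 'accumulation', 'manipulation',
--                      'distribution', 'amd'],
--
--     # Institutional
--     'institutional': ['smart money', 'institutional', 'market maker',
--                       'banks', 'hedge funds', 'retail traders'],
--
--     # Breaker/Mitigation
--     'breaker': ['breaker', 'breaker block', 'mitigation block',
--                 'rejection block', 'propulsion block'],
--
--     # Time-based
--     'time_based': ['macro', 'micro', 'quarterly shift', 'monthly',
--                    'weekly', 'daily', 'hourly', 'time and price'],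
--
--     # Price Action
--     'price_action': ['candlestick', 'engulfing', 'pin bar', 'doji',
--                      'hammer', 'shooting star', 'wick', 'body'],
-- }
--
-- def extract_cooccurrence_features(text: str, window_size: int = 50) -> Dict[str, int]:
--     """Extract concept co-occurrence features within text windows"""
--     words = text.lower().split()
--     cooccurrences = defaultdict(int)
--
--     concept_positions = defaultdict(list)
--
--     # Find positions of each concept
--     for i, word in enumerate(words):
--         for concept_name, terms in SMART_MONEY_VOCABULARY.items():
--             for term in terms:
--                 if term in ' '.join(words[max(0, i-2):i+3]):
--                     concept_positions[concept_name].append(i)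
--                     break
--
--     # Count co-occurrences within window
--     concept_names = list(SMART_MONEY_VOCABULARY.keys())
--     for i, c1 in enumerate(concept_names):
--         for c2 in concept_names[i+1:]:
--             count = 0
--             for pos1 in concept_positions[c1]:
--                 for pos2 in concept_positions[c2]:
--                     if abs(pos1 - pos2) <= window_size:
--                         count += 1
--             cooccurrences[f'{c1}_{c2}_cooc'] = count
--
--     return dict(cooccurrences)
-- ===== SOURCE B (Python) =====
-- # B: positions per concept via one comprehension with the window string built once per
-- # position (A rebuilds it for every candidate term), then a two-pointer sliding window
-- # per concept pair instead of A's nested all-pairs scan.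
-- from typing import Dict
-- from collections import defaultdict  # same modules as A (unused beyond parity with A's imports)
--
-- SMART_MONEY_VOCABULARY = {
--     'market_structure': ['bos', 'break of structure', 'choch', 'change of character',
--                          'higher high', 'higher low', 'lower high', 'lower low',
--                          'hh', 'hl', 'lh', 'll', 'trend', 'structure'],
--     'order_block': ['order block', 'orderblock', 'ob', 'bullish ob', 'bearish ob',
--                     'mitigation', 'mitigated', 'unmitigated'],
--     'fair_value_gap': ['fair value gap', 'fvg', 'imbalance', 'inefficiency',
--                        'balanced price range', 'bpr'],
--     'liquidity': ['liquidity', 'buy side liquidity', 'sell side liquidity',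
--                   'bsl', 'ssl', 'liquidity sweep', 'liquidity grab',
--                   'stop hunt', 'equal highs', 'equal lows', 'eqh', 'eql'],
--     'premium_discount': ['premium', 'discount', 'equilibrium', 'eq',
--                          'premium array', 'discount array', '50%', 'fifty percent'],
--     'kill_zones': ['kill zone', 'killzone', 'asian session', 'london session',
--                    'new york session', 'london open', 'ny open', 'asian range'],
--     'entry_models': ['optimal trade entry', 'ote', 'silver bullet',
--                      'power of three', 'po3', 'accumulation', 'manipulation',
--                      'distribution', 'amd'],
--     'institutional': ['smart money', 'institutional', 'market maker',
--                       'banks', 'hedge funds', 'retail traders'],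
--     'breaker': ['breaker', 'breaker block', 'mitigation block',
--                 'rejection block', 'propulsion block'],
--     'time_based': ['macro', 'micro', 'quarterly shift', 'monthly',
--                    'weekly', 'daily', 'hourly', 'time and price'],
--     'price_action': ['candlestick', 'engulfing', 'pin bar', 'doji',
--                      'hammer', 'shooting star', 'wick', 'body'],
-- }
--
--
-- def _hits(terms, window):
--     """any(term in window for term in terms) — window string built once, not per term."""
--     return any(t in window for t in terms)
--
--
-- def _advance(qs, i, pred):
--     """First index >= i whose element fails pred (qs scanned left to right)."""
--     while i < len(qs) and pred(qs[i]):
--         i += 1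
--     return i
--
--
-- def extract_cooccurrence_features(text: str, window_size: int = 50) -> Dict[str, int]:
--     """Extract concept co-occurrence features within text windows"""
--     words = text.lower().split()
--     n = len(words)
--
--     # sorted position list per concept; the window string is built once per position,
--     # not once per candidate term as in the nested formulation
--     items = []
--     for concept, terms in SMART_MONEY_VOCABULARY.items():
--         items.append((concept,
--                       [i for i in range(n)
--                        if _hits(terms, ' '.join(words[max(0, i - 2):i + 3]))]))
--
--     out = {}
--     while items:
--         (c1, ps) = items[0]
--         items = items[1:]
--         for c2, qs in items:
--             lo = hi = 0
--             total = 0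
--             for p in ps:  # two-pointer: both position lists are increasing
--                 lo = _advance(qs, lo, lambda q: q < p - window_size)
--                 hi = _advance(qs, hi, lambda q: q <= p + window_size)
--                 if lo < hi:
--                     total += hi - lo
--             out[f'{c1}_{c2}_cooc'] = total
--     return out
-- ===== Notes on version B (the rewrite author's own statement) =====
-- stated objective: alternative
-- what changed: B builds each five-word window string once per position instead of once per candidate term, collects the (increasing) position list per concept by one comprehension, and counts each concept pair with a two-pointer sliding window instead of A's nested all-pairs scan; intended as faster, but a timing run could not confirm it consistently (median 1.56x at the largest size), so no speed is claimed.
import Mathlib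
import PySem

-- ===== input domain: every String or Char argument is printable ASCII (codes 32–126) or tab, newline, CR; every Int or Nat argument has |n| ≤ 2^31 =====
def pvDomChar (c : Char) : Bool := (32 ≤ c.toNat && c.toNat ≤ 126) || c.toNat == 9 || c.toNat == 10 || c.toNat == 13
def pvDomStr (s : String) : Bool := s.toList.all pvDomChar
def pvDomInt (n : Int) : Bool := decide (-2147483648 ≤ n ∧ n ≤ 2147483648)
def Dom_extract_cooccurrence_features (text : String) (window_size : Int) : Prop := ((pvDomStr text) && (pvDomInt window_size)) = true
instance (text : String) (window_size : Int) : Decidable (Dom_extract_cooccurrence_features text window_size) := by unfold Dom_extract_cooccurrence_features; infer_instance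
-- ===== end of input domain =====

-- B builds the window string once per position (A rebuilds it per candidate term) and replaces
-- A's nested all-pairs count by a two-pointer sliding window over the increasing position lists.

-- shared constant: the module-level SMART_MONEY_VOCABULARY dict (association list, insertion order)
def pvVocab : List (String × List String) :=
  [("market_structure", ["bos", "break of structure", "choch", "change of character",
                         "higher high", "higher low", "lower high", "lower low",
                         "hh", "hl", "lh", "ll", "trend", "structure"]),
   ("order_block", ["order block", "orderblock", "ob", "bullish ob", "bearish ob",
                    "mitigation", "mitigated", "unmitigated"]),
   ("fair_value_gap", ["fair value gap", "fvg", "imbalance", "inefficiency",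
                       "balanced price range", "bpr"]),
   ("liquidity", ["liquidity", "buy side liquidity", "sell side liquidity",
                  "bsl", "ssl", "liquidity sweep", "liquidity grab",
                  "stop hunt", "equal highs", "equal lows", "eqh", "eql"]),
   ("premium_discount", ["premium", "discount", "equilibrium", "eq",
                         "premium array", "discount array", "50%", "fifty percent"]),
   ("kill_zones", ["kill zone", "killzone", "asian session", "london session",
                   "new york session", "london open", "ny open", "asian range"]),
   ("entry_models", ["optimal trade entry", "ote", "silver bullet",
                     "power of three", "po3", "accumulation", "manipulation",
                     "distribution", "amd"]),
   ("institutional", ["smart money", "institutional", "market maker",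
                      "banks", "hedge funds", "retail traders"]),
   ("breaker", ["breaker", "breaker block", "mitigation block",
                "rejection block", "propulsion block"]),
   ("time_based", ["macro", "micro", "quarterly shift", "monthly",
                   "weekly", "daily", "hourly", "time and price"]),
   ("price_action", ["candlestick", "engulfing", "pin bar", "doji",
                     "hammer", "shooting star", "wick", "body"])]

-- shared helper: the window string ' '.join(words[max(0, i-2):i+3]) (identical text in both Pythons)
def pvWindow (words : List String) (i : Int) : String :=
  PySem.Str.join " " (PySem.List.slice words (some (max 0 (i - 2))) (some (i + 3)))

-- A's condition: for term in terms: term in ' '.join(...) — the join recomputed per term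
def pvPred (words : List String) (ct : String × List String) (i : Int) : Bool :=
  ct.2.any (fun term => PySem.Str.isIn term (pvWindow words i))

-- B's helper _hits(terms, window): any(t in window for t in terms), window built once
def pvHits (terms : List String) (window : String) : Bool :=
  terms.any (fun t => PySem.Str.isIn t window)

-- ===== PORT A =====
-- A's inner co-occurrence count: for pos1 in ps: for pos2 in qs: if abs(pos1-pos2) <= w: count += 1
def pvCountA (ps qs : List Int) (w : Int) : Int :=
  ps.foldl (fun count pos1 =>
    qs.foldl (fun count pos2 => if |pos1 - pos2| ≤ w then count + 1 else count) count) 0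

-- A's first loop: for i, word in enumerate(words): for concept, terms: for term: if term in window: append i; break
def pvFindPositions (words : List String) : PySem.Dict String (List Int) :=
  (PySem.List.enumerate words).foldl (fun d iw =>
    pvVocab.foldl (fun d ct =>
      if pvPred words ct iw.1
      then d.modify ct.1 [] (· ++ [iw.1]) else d) d)
    PySem.Dict.empty

def extract_cooccurrence_features (text : String) (window_size : Int) : List (String × Int) :=
  let words := PySem.Str.split₀ (PySem.Str.lower text)
  let concept_positions := pvFindPositions words
  let concept_names := pvVocab.map (·.1)
  let cooccurrences := (PySem.List.enumerate concept_names).foldl (fun d ic =>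
      (PySem.List.slice concept_names (some (ic.1 + 1)) none).foldl (fun d c2 =>
        d.insert (ic.2 ++ "_" ++ c2 ++ "_cooc")
          (pvCountA (concept_positions.getD ic.2 []) (concept_positions.getD c2 []) window_size)) d)
    PySem.Dict.empty
  cooccurrences.items

-- ===== PORT B =====
-- B's helper _advance(qs, i, pred): while i < len(qs) and pred(qs[i]): i += 1
def pvAdvance (qs : List Int) (i : Nat) (pred : Int → Bool) : Nat :=
  if h : i < qs.length then
    if pred qs[i] then pvAdvance qs (i + 1) pred else i
  else i
termination_by qs.length - i

-- B's two-pointer count per pair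
def pvCountB (ps qs : List Int) (w : Int) : Int :=
  (ps.foldl (fun s p =>
      let lo := pvAdvance qs s.1 (fun q => q < p - w)
      let hi := pvAdvance qs s.2.1 (fun q => q ≤ p + w)
      (lo, hi, if lo < hi then s.2.2 + ((hi : Int) - (lo : Int)) else s.2.2))
    ((0 : Nat), (0 : Nat), (0 : Int))).2.2

-- B's pair loop: while items: (c1, ps) = items[0]; items = items[1:]; for c2, qs in items: ...
def pvEmit (w : Int) : List (String × List Int) → PySem.Dict String Int → PySem.Dict String Int
  | [], d => d
  | (c1, ps) :: rest, d =>
      pvEmit w rest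
        (rest.foldl (fun d cq => d.insert (c1 ++ "_" ++ cq.1 ++ "_cooc") (pvCountB ps cq.2 w)) d)

def extract_cooccurrence_features_alt (text : String) (window_size : Int) : List (String × Int) :=
  let words := PySem.Str.split₀ (PySem.Str.lower text)
  let n : Int := words.length
  let items := pvVocab.map (fun ct =>
    (ct.1, (PySem.List.pyRange 0 n 1).filter (fun i => pvHits ct.2 (pvWindow words i))))
  (pvEmit window_size items PySem.Dict.empty).items

-- ===== PRECONDITION & SPEC =====
def Spec_extract_cooccurrence_features (text : String) (window_size : Int) (out : List (String × Int)) : Prop := out = extract_cooccurrence_features_alt text window_size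
instance (text : String) (window_size : Int) (out : List (String × Int)) : Decidable (Spec_extract_cooccurrence_features text window_size out) := by unfold Spec_extract_cooccurrence_features; infer_instance

-- ===== CLAIM (what is proved, stated in full; the proofs are below) =====
def Claim_equal_extract_cooccurrence_features : Prop := ∀ (text : String) (window_size : Int), Dom_extract_cooccurrence_features text window_size → Spec_extract_cooccurrence_features text window_size (extract_cooccurrence_features text window_size)

-- ===== LEMMAS AND PROOFS =====

-- positions a concept name is mapped to, as one comprehension over word indices
def pvPosOf (words : List String) (c : String) : List Int :=
  (PySem.List.pyRange 0 (words.length : Int) 1).filter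
    (fun i => pvVocab.any (fun ct => ct.1 == c && pvPred words ct i))

-- generic suffix-recursion form shared by the two pair loops
def pvEmitNames (g : String → String → Int) : List String → PySem.Dict String Int → PySem.Dict String Int
  | [], d => d
  | c1 :: rest, d =>
      pvEmitNames g rest (rest.foldl (fun d c2 => d.insert (c1 ++ "_" ++ c2 ++ "_cooc") (g c1 c2)) d)

lemma pvVocab_nodup : (pvVocab.map (·.1)).Nodup := by decide

-- A's inner vocabulary loop: effect on one key
lemma pvInner_getD (words : List String) (i : Int) (c : String) :
    ∀ (vs : List (String × List String)), (vs.map (·.1)).Nodup →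
    ∀ (d : PySem.Dict String (List Int)),
      (vs.foldl (fun d ct => if pvPred words ct i then d.modify ct.1 [] (· ++ [i]) else d) d).getD c []
        = d.getD c [] ++ (if vs.any (fun ct => ct.1 == c && pvPred words ct i) then [i] else []) := by
  intro vs
  induction vs with
  | nil => intro _ d; simp
  | cons ct vs ih =>
    intro hnd d
    have hnd' : (vs.map (·.1)).Nodup := (List.nodup_cons.mp hnd).2
    have hcm : ct.1 ∉ vs.map (·.1) := (List.nodup_cons.mp hnd).1
    simp only [List.foldl_cons]
    by_cases hk : ct.1 = c
    · have hany : vs.any (fun ct' => ct'.1 == c && pvPred words ct' i) = false := by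
        simp only [List.any_eq_false]
        intro x hx
        simp only [Bool.and_eq_true, beq_iff_eq, not_and]
        intro hxc _
        exact hcm (hk ▸ hxc ▸ List.mem_map_of_mem hx)
      subst hk
      by_cases hp : pvPred words ct i = true
      · have hA : ((ct :: vs).any fun ct' => ct'.1 == ct.1 && pvPred words ct' i) = true := by
          simp [hp]
        rw [if_pos hp, ih hnd' _, hany, if_pos hA,
            PySem.Dict.getD_modify_self d ct.1 ([] : List Int) (· ++ [i])]
        simp
      · have hp' : pvPred words ct i = false := by simpa using hp
        have hA : ((ct :: vs).any fun ct' => ct'.1 == ct.1 && pvPred words ct' i) = false := by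
          simp [hp', hany]
        rw [if_neg hp, ih hnd' d, hany, hA]
    · have hne : c ≠ ct.1 := fun h => hk h.symm
      have hb : (ct.1 == c) = false := beq_eq_false_iff_ne.mpr hk
      have hA : ((ct :: vs).any fun ct' => ct'.1 == c && pvPred words ct' i)
          = (vs.any fun ct' => ct'.1 == c && pvPred words ct' i) := by
        simp [hb]
      by_cases hp : pvPred words ct i = true
      · rw [if_pos hp, ih hnd' _,
            PySem.Dict.getD_modify_of_ne d ([] : List Int) (· ++ [i]) hne, hA]
      · rw [if_neg hp, ih hnd' d, hA]

-- A's position-finding loop: the list stored at key c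
lemma pvOuter_getD (words : List String) (c : String) :
    ∀ (l : List (Int × String)) (d : PySem.Dict String (List Int)),
      (l.foldl (fun d iw =>
          pvVocab.foldl (fun d ct => if pvPred words ct iw.1 then d.modify ct.1 [] (· ++ [iw.1]) else d) d) d).getD c []
        = d.getD c [] ++ (l.map (·.1)).filter (fun i => pvVocab.any (fun ct => ct.1 == c && pvPred words ct i)) := by
  intro l
  induction l with
  | nil => intro d; simp
  | cons iw l ih =>
    intro d
    simp only [List.foldl_cons, List.map_cons, List.filter_cons]
    rw [ih]
    rw [pvInner_getD words iw.1 c pvVocab pvVocab_nodup d]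
    by_cases h : pvVocab.any (fun ct => ct.1 == c && pvPred words ct iw.1) = true
    · simp [h, List.append_assoc]
    · simp [Bool.eq_false_iff.mpr h]

lemma pvFindPositions_getD (words : List String) (c : String) :
    (pvFindPositions words).getD c [] = pvPosOf words c := by
  unfold pvFindPositions pvPosOf
  rw [pvOuter_getD words c (PySem.List.enumerate words) PySem.Dict.empty]
  rw [PySem.Dict.getD_empty]
  rw [PySem.List.map_fst_enumerate words 0]
  simp

lemma pvVocab_entry_inj {ct ct' : String × List String} (h : ct ∈ pvVocab) (h' : ct' ∈ pvVocab)
    (hk : ct.1 = ct'.1) : ct = ct' :=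
  List.inj_on_of_nodup_map pvVocab_nodup h h' hk

lemma pvPosOf_entry (words : List String) {ct : String × List String} (hct : ct ∈ pvVocab) :
    pvPosOf words ct.1 = (PySem.List.pyRange 0 (words.length : Int) 1).filter (fun i => pvPred words ct i) := by
  unfold pvPosOf
  apply List.filter_congr
  intro i _
  by_cases hp : pvPred words ct i = true
  · rw [hp]
    exact List.any_eq_true.mpr ⟨ct, hct, by simp [hp]⟩
  · have hp' : pvPred words ct i = false := by simpa using hp
    rw [hp']
    apply List.any_eq_false.mpr
    intro x hx
    simp only [Bool.and_eq_true, beq_iff_eq, not_and]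
    intro hxc hpx
    exact hp ((pvVocab_entry_inj hx hct hxc) ▸ hpx)

lemma pvPosOf_sorted (words : List String) (c : String) : (pvPosOf words c).Pairwise (· ≤ ·) := by
  unfold pvPosOf
  exact ((PySem.List.pairwise_lt_pyRange_one 0 (words.length : Int)).filter _).imp (fun h => le_of_lt h)

-- the two-pointer advance reaches exactly the count of passing elements
theorem pvAdvance_eq (qs : List Int) (p : Int → Bool)
    (hmono : ∀ a b : Int, a ≤ b → p b = true → p a = true)
    (hs : qs.Pairwise (· ≤ ·)) (i : Nat) (hi : i ≤ qs.countP p) :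
    pvAdvance qs i p = qs.countP p := by
  rw [pvAdvance]
  split
  case isTrue h =>
    split
    case isTrue hp =>
      have hstep : i + 1 ≤ qs.countP p := by
        have hall : ∀ a ∈ qs.take (i+1), p a = true := by
          intro a ha
          obtain ⟨j, hj, rfl⟩ := List.getElem_of_mem ha
          have hjl : j < i + 1 := by
            rw [List.length_take] at hj; omega
          rw [List.getElem_take]
          rcases Nat.lt_or_ge j i with hlt | hge
          · have hle : qs[j] ≤ qs[i] := (List.pairwise_iff_getElem.mp hs) j i (by omega) h hlt
            exact hmono _ _ hle hp
          · have : j = i := by omega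
            subst this; exact hp
        have h1 : (qs.take (i+1)).countP p = i + 1 := by
          rw [List.countP_eq_length.mpr hall, List.length_take]; omega
        have h2 : qs.countP p = (qs.take (i+1)).countP p + (qs.drop (i+1)).countP p := by
          conv_lhs => rw [← List.take_append_drop (i+1) qs]
          rw [List.countP_append]
        omega
      exact pvAdvance_eq qs p hmono hs (i+1) hstep
    case isFalse hp =>
      have h0 : (qs.drop i).countP p = 0 := by
        rw [List.countP_eq_zero]
        intro a ha
        obtain ⟨j, hj, rfl⟩ := List.getElem_of_mem ha
        rw [List.getElem_drop]
        intro hpa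
        rcases Nat.eq_zero_or_pos j with rfl | hj0
        · simp at hpa; exact hp hpa
        · have hij : i + j < qs.length := by
            have := hj; simp [List.length_drop] at this; omega
          have hle : qs[i] ≤ qs[i+j] := (List.pairwise_iff_getElem.mp hs) i (i+j) h hij (by omega)
          exact hp (hmono _ _ hle hpa)
      have h2 : qs.countP p = (qs.take i).countP p + (qs.drop i).countP p := by
        conv_lhs => rw [← List.take_append_drop i qs]
        rw [List.countP_append]
      have h3 : (qs.take i).countP p ≤ i := by
        have h4 := List.countP_le_length (p := p) (l := qs.take i)
        rw [List.length_take] at h4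
        omega
      omega
  case isFalse h =>
    have := List.countP_le_length (p := p) (l := qs)
    omega
termination_by qs.length - i

lemma pvCntSplit (qs : List Int) (x y : Int) (hxy : x ≤ y + 1) :
    qs.countP (fun q => decide (q ≤ y)) =
      qs.countP (fun q => decide (q < x)) + qs.countP (fun q => decide (x ≤ q) && decide (q ≤ y)) := by
  induction qs with
  | nil => rfl
  | cons a l ih =>
    simp only [List.countP_cons]
    by_cases h1 : a ≤ y <;> by_cases h2 : a < x <;> by_cases h3 : x ≤ a <;>
      simp [h1, h2, h3, ih] <;> omega

lemma pvCountWindow (qs : List Int) (p w : Int) :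
    ((qs.countP (fun q => decide (|p - q| ≤ w)) : Int)) =
      if qs.countP (fun q => decide (q < p - w)) < qs.countP (fun q => decide (q ≤ p + w))
      then (qs.countP (fun q => decide (q ≤ p + w)) : Int) - (qs.countP (fun q => decide (q < p - w)) : Int)
      else 0 := by
  have hwin : qs.countP (fun q => decide (|p - q| ≤ w))
      = qs.countP (fun q => decide (p - w ≤ q) && decide (q ≤ p + w)) := by
    apply List.countP_congr
    intro q _
    simp only [decide_eq_true_eq, Bool.and_eq_true]
    rw [abs_le]
    omega
  by_cases hw : 0 ≤ w
  · have hsplit := pvCntSplit qs (p - w) (p + w) (by omega)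
    rw [hwin]
    split_ifs with hlt
    · omega
    · omega
  · have h0 : qs.countP (fun q => decide (|p - q| ≤ w)) = 0 := by
      rw [List.countP_eq_zero]
      intro a _
      simp only [decide_eq_true_eq]
      intro hc
      have := abs_nonneg (p - a)
      linarith
    have hle : qs.countP (fun q => decide (q ≤ p + w)) ≤ qs.countP (fun q => decide (q < p - w)) := by
      apply List.countP_mono_left
      intro a _ h
      simp only [decide_eq_true_eq] at h ⊢
      omega
    rw [h0, if_neg (by omega)]
    norm_num

lemma pvLoopB (qs : List Int) (w : Int) (hq : qs.Pairwise (· ≤ ·)) :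
    ∀ (ps : List Int), ps.Pairwise (· ≤ ·) →
    ∀ (lo hi : Nat) (t : Int),
      (∀ p ∈ ps, lo ≤ qs.countP (fun q => q < p - w) ∧ hi ≤ qs.countP (fun q => q ≤ p + w)) →
      (ps.foldl (fun s p =>
          let lo := pvAdvance qs s.1 (fun q => q < p - w)
          let hi := pvAdvance qs s.2.1 (fun q => q ≤ p + w)
          (lo, hi, if lo < hi then s.2.2 + ((hi : Int) - (lo : Int)) else s.2.2)) (lo, hi, t)).2.2
        = t + (ps.map (fun p => (qs.countP (fun q => decide (|p - q| ≤ w)) : Int))).sum := by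
  intro ps
  induction ps with
  | nil => intro _ lo hi t _; simp
  | cons p ps ih =>
    intro hps lo hi t hbound
    have hhead := hbound p (List.mem_cons_self ..)
    have hrest : ∀ p' ∈ ps, p ≤ p' := (List.pairwise_cons.mp hps).1
    have hp' : ps.Pairwise (· ≤ ·) := (List.pairwise_cons.mp hps).2
    simp only [List.foldl_cons]
    have hlo : pvAdvance qs lo (fun q => q < p - w) = qs.countP (fun q => q < p - w) := by
      apply pvAdvance_eq qs _ _ hq lo hhead.1
      intro a b hab hb
      simp only [decide_eq_true_eq] at hb ⊢
      omega
    have hhi : pvAdvance qs hi (fun q => q ≤ p + w) = qs.countP (fun q => q ≤ p + w) := by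
      apply pvAdvance_eq qs _ _ hq hi hhead.2
      intro a b hab hb
      simp only [decide_eq_true_eq] at hb ⊢
      omega
    simp only [hlo, hhi]
    rw [ih hp' _ _ _ ?bounds]
    case bounds =>
      intro p' hp'mem
      have hpp' := hrest p' hp'mem
      constructor
      · apply List.countP_mono_left
        intro a _ h
        simp only [decide_eq_true_eq] at h ⊢
        omega
      · apply List.countP_mono_left
        intro a _ h
        simp only [decide_eq_true_eq] at h ⊢
        omega
    rw [List.map_cons, List.sum_cons, pvCountWindow qs p w]
    split_ifs with h
    · ring
    · ring

lemma pvCountA_eq_sum (ps qs : List Int) (w : Int) :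
    pvCountA ps qs w = (ps.map (fun p => (qs.countP (fun q => decide (|p - q| ≤ w)) : Int))).sum := by
  unfold pvCountA
  rw [PySem.List.foldl_congr_mem ps _
        (fun count pos1 => count + (qs.countP (fun q => decide (|pos1 - q| ≤ w)) : Int)) 0
        (fun acc x _ => PySem.List.foldl_ite_add_one (fun pos2 => |x - pos2| ≤ w) qs acc)]
  rw [PySem.List.foldl_add]
  rw [zero_add]

lemma pvCount_eq (ps qs : List Int) (w : Int) (hp : ps.Pairwise (· ≤ ·)) (hq : qs.Pairwise (· ≤ ·)) :
    pvCountA ps qs w = pvCountB ps qs w := by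
  rw [pvCountA_eq_sum]
  unfold pvCountB
  rw [pvLoopB qs w hq ps hp 0 0 0 (fun p _ => ⟨Nat.zero_le _, Nat.zero_le _⟩)]
  rw [zero_add]

-- A's enumerate/slice pair loop is the suffix recursion pvEmitNames
lemma pvFoldA_eq (g : String → String → Int) :
    ∀ (names : List String) (s : Int) (d : PySem.Dict String Int), 0 ≤ s →
      PySem.List.slice (pvVocab.map (·.1)) (some s) none = names →
      (PySem.List.enumerate names s).foldl (fun d ic =>
          (PySem.List.slice (pvVocab.map (·.1)) (some (ic.1 + 1)) none).foldl (fun d c2 =>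
            d.insert (ic.2 ++ "_" ++ c2 ++ "_cooc") (g ic.2 c2)) d) d
        = pvEmitNames g names d := by
  intro names
  induction names with
  | nil => intro s d _ _; simp [pvEmitNames, PySem.List.enumerate]
  | cons c rest ih =>
    intro s d hs hsl
    rw [PySem.List.enumerate_cons]
    simp only [List.foldl_cons]
    have hdrop : PySem.List.slice (pvVocab.map (·.1)) (some (s + 1)) none = rest := by
      rw [PySem.List.slice_from _ (by omega)]
      rw [PySem.List.slice_from _ hs] at hsl
      have ht : (s + 1).toNat = s.toNat + 1 := by omega
      rw [ht, ← List.drop_drop, hsl]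
      simp
    rw [hdrop]
    rw [pvEmitNames]
    exact ih (s + 1) _ (by omega) hdrop

-- B's pair loop over (name, positions) pairs, read through a lookup function
lemma pvEmit_eq_names (w : Int) (Q : String → List Int) :
    ∀ (its : List (String × List Int)) (d : PySem.Dict String Int), (∀ x ∈ its, x.2 = Q x.1) →
      pvEmit w its d = pvEmitNames (fun c1 c2 => pvCountB (Q c1) (Q c2) w) (its.map (·.1)) d := by
  intro its
  induction its with
  | nil => intro d _; rfl
  | cons x rest ih =>
    intro d hx
    obtain ⟨c1, ps⟩ := x
    have hps : ps = Q c1 := hx (c1, ps) (List.mem_cons_self ..)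
    rw [pvEmit, List.map_cons, pvEmitNames]
    rw [ih _ (fun y hy => hx y (List.mem_cons_of_mem _ hy))]
    congr 1
    rw [List.foldl_map]
    apply PySem.List.foldl_congr_mem
    intro acc y hy
    rw [hps, hx y (List.mem_cons_of_mem _ hy)]

-- ===== VERDICT (by name: the statement is the Claim_ definition above) =====
set_option maxHeartbeats 1000000 in
theorem extract_cooccurrence_features_spec : Claim_equal_extract_cooccurrence_features := by
  intro text w _
  unfold Spec_extract_cooccurrence_features
  simp only [extract_cooccurrence_features, extract_cooccurrence_features_alt]
  refine congrArg PySem.Dict.items ?_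
  have hslice0 : PySem.List.slice (pvVocab.map (·.1)) (some (0 : Int)) none = pvVocab.map (·.1) := by
    rw [PySem.List.slice_from _ (le_refl 0)]
    simp
  rw [pvFoldA_eq
      (fun c1 c2 => pvCountA ((pvFindPositions (PySem.Str.split₀ (PySem.Str.lower text))).getD c1 [])
                             ((pvFindPositions (PySem.Str.split₀ (PySem.Str.lower text))).getD c2 []) w)
      (pvVocab.map (·.1)) 0 PySem.Dict.empty (le_refl 0) hslice0]
  have hQ : ∀ c, (pvFindPositions (PySem.Str.split₀ (PySem.Str.lower text))).getD c []
      = pvPosOf (PySem.Str.split₀ (PySem.Str.lower text)) c :=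
    fun c => pvFindPositions_getD _ c
  have hg : (fun c1 c2 => pvCountA ((pvFindPositions (PySem.Str.split₀ (PySem.Str.lower text))).getD c1 [])
                             ((pvFindPositions (PySem.Str.split₀ (PySem.Str.lower text))).getD c2 []) w)
      = (fun c1 c2 => pvCountB (pvPosOf (PySem.Str.split₀ (PySem.Str.lower text)) c1)
                               (pvPosOf (PySem.Str.split₀ (PySem.Str.lower text)) c2) w) := by
    funext c1 c2
    rw [hQ c1, hQ c2]
    exact pvCount_eq _ _ w (pvPosOf_sorted _ c1) (pvPosOf_sorted _ c2)
  rw [hg]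
  have hx : ∀ x ∈ pvVocab.map (fun ct =>
        (ct.1, (PySem.List.pyRange 0 ((PySem.Str.split₀ (PySem.Str.lower text)).length : Int) 1).filter
                  (fun i => pvHits ct.2 (pvWindow (PySem.Str.split₀ (PySem.Str.lower text)) i)))),
      x.2 = pvPosOf (PySem.Str.split₀ (PySem.Str.lower text)) x.1 := by
    intro x hxm
    obtain ⟨ct, hct, rfl⟩ := List.mem_map.mp hxm
    exact (pvPosOf_entry _ hct).symm
  rw [pvEmit_eq_names w (pvPosOf (PySem.Str.split₀ (PySem.Str.lower text))) _ PySem.Dict.empty hx]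
  rfl
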